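-- pv_equiv track=rewrite | github.com/daniel-reich/turbo-robot | k7YPvRyJt9NHbrvzu_9.py | football
-- ===== SOURCE A (Python) =====
-- def football(score):
--     if score == 0:
--         return 1
--     if score == 1:
--         return 0
--     ctr = 0
--     temp = []
--     for a in range(score//8+1):
--         for b in range(score//7+1):
--             for c in range(score//6+1):
--                 for d in range(score//3+1):
--                     for e in range(score//2+1):
--                         if a*8+b*7+c*6+d*3+e*2 == score:
--                             ctr += 1
--                             temp.append([a,b,c,d,e])
--
--     return ctr
-- ===== SOURCE B (Python) =====
-- def football(score):
--     if score < 0: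
--         return 0
--     dp = [1] + [0] * score
--     for coin in (2, 3, 6, 7, 8):
--         for i in range(coin, score + 1):
--             dp[i] += dp[i - coin]
--     return dp[score]
-- ===== Notes on version B (the rewrite author's own statement) =====
-- stated objective: faster
-- what changed: Replaces A's quintuple nested loop over all (a,b,c,d,e) candidates by the classic one-dimensional coin-change DP over denominations (2,3,6,7,8), counting the same representations of score.
import Mathlib
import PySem

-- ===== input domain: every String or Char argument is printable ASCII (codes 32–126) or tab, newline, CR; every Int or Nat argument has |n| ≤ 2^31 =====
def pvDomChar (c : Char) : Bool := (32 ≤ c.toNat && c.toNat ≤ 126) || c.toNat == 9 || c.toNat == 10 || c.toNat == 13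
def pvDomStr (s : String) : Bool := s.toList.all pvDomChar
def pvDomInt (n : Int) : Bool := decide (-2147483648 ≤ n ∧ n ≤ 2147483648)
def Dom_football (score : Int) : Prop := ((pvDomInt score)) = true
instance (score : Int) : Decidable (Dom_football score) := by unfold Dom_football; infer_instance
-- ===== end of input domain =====

-- B replaces A's five nested loops by the classic one-pass coin-change DP over denominations
-- [2,3,6,7,8]; both count solutions of 8a+7b+6c+3d+2e = score. Intended as faster; the timing
-- run measured B ~104x at n=16 (A timed out at larger sizes, so no larger ratio was confirmed).

-- ===== PORT A =====
-- Literal port of A's counting loops; the list 'temp' of A is dead for the return value and omitted.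
def football (score : Int) : Int :=
  if score = 0 then 1
  else if score = 1 then 0
  else
    (PySem.List.pyRange 0 (PySem.Int.floordiv score 8 + 1) 1).foldl (fun ctr a =>
      (PySem.List.pyRange 0 (PySem.Int.floordiv score 7 + 1) 1).foldl (fun ctr b =>
        (PySem.List.pyRange 0 (PySem.Int.floordiv score 6 + 1) 1).foldl (fun ctr c =>
          (PySem.List.pyRange 0 (PySem.Int.floordiv score 3 + 1) 1).foldl (fun ctr d =>
            (PySem.List.pyRange 0 (PySem.Int.floordiv score 2 + 1) 1).foldl (fun ctr e =>
              if a * 8 + b * 7 + c * 6 + d * 3 + e * 2 = score then ctr + 1 else ctr)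
              ctr) ctr) ctr) ctr) 0

-- ===== PORT B =====
-- Literal port of Source B: bottom-up coin-change DP; dp[i] += dp[i-coin] is pySetD/pyGetD.
def football_alt (score : Int) : Int :=
  if score < 0 then 0
  else
    let dp0 : List Int := 1 :: List.replicate score.toNat 0
    let dp := [(2 : Int), 3, 6, 7, 8].foldl (fun dp coin =>
      (PySem.List.pyRange coin (score + 1) 1).foldl (fun dp i =>
        PySem.List.pySetD dp i (PySem.List.pyGetD dp i 0 + PySem.List.pyGetD dp (i - coin) 0))
        dp) dp0
    PySem.List.pyGetD dp score 0

-- ===== PRECONDITION & SPEC =====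
def Spec_football (score : Int) (out : Int) : Prop := out = football_alt score
instance (score : Int) (out : Int) : Decidable (Spec_football score out) := by unfold Spec_football; infer_instance

-- ===== CLAIM (what is proved, stated in full; the proofs are below) =====
def Claim_equal_football : Prop := ∀ (score : Int), Dom_football score → Spec_football score (football score)

-- ===== LEMMAS AND PROOFS =====

-- number of ways to write t as a sum of the given coins (multiplicities), 0 for negative t
def wZ : List Nat → Int → Int
  | [], t => if t = 0 then 1 else 0
  | c :: cs, t =>
      if t < 0 then 0
      else ((List.range (t.toNat / c + 1)).map (fun k : Nat => wZ cs (t - (c : Int) * (k : Int)))).sum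

theorem wZ_neg (cs : List Nat) (t : Int) (ht : t < 0) : wZ cs t = 0 := by
  cases cs with
  | nil => simp [wZ]; omega
  | cons c cs => simp [wZ, ht]

theorem wZ_lt (c : Nat) (cs : List Nat) (t : Int) (h0 : 0 ≤ t) (hlt : t < c) :
    wZ (c :: cs) t = wZ cs t := by
  have hdiv : t.toNat / c = 0 := Nat.div_eq_of_lt (by omega)
  simp [wZ, not_lt.mpr h0, hdiv, List.range_succ]

theorem wZ_rec (c : Nat) (cs : List Nat) (hc : 0 < c) (x : Nat) (hcx : c ≤ x) :
    wZ (c :: cs) (x : Int) = wZ cs (x : Int) + wZ (c :: cs) ((x - c : Nat) : Int) := by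
  have hx0 : ¬ ((x : Int) < 0) := by omega
  have hy0 : ¬ (((x - c : Nat) : Int) < 0) := by omega
  have htn : (x : Int).toNat = x := Int.toNat_natCast x
  have hyn : ((x - c : Nat) : Int).toNat = x - c := Int.toNat_natCast _
  have hdiv : x / c = (x - c) / c + 1 := Nat.div_eq_sub_div hc hcx
  simp only [wZ, if_neg hx0, if_neg hy0, htn, hyn, hdiv]
  rw [List.range_succ_eq_map]
  simp only [List.map_cons, List.sum_cons, List.map_map]
  congr 1
  apply congrArg
  apply List.map_congr_left
  intro k _
  simp only [Function.comp, Nat.succ_eq_add_one]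
  congr 1
  push_cast [Nat.cast_sub hcx]
  ring

-- extending the k-range beyond t/c only adds zero terms
theorem level (cs : List Nat) (c : Nat) (hc : 0 < c) (M : Nat) (t : Int) (ht : t ≤ M) :
    ((List.range (M / c + 1)).map (fun k : Nat => wZ cs (t - (c : Int) * (k : Int)))).sum
      = wZ (c :: cs) t := by
  by_cases ht0 : t < 0
  · rw [wZ, if_pos ht0]
    apply List.sum_eq_zero
    intro y hy
    obtain ⟨k, _, rfl⟩ := List.mem_map.mp hy
    have hck : (0 : Int) ≤ (c : Int) * (k : Int) := by positivity
    exact wZ_neg cs _ (by omega)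
  · have hm : t.toNat / c ≤ M / c := Nat.div_le_div_right (by omega)
    have hsplit : M / c + 1 = (t.toNat / c + 1) + (M / c - t.toNat / c) := by omega
    rw [hsplit, List.range_add, List.map_append, List.map_map, List.sum_append]
    have hz : ((List.range (M / c - t.toNat / c)).map
        ((fun k : Nat => wZ cs (t - (c : Int) * (k : Int))) ∘ (fun j => t.toNat / c + 1 + j))).sum = 0 := by
      apply List.sum_eq_zero
      intro y hy
      obtain ⟨j, _, rfl⟩ := List.mem_map.mp hy
      apply wZ_neg
      have h1 : t.toNat < c * (t.toNat / c + 1) := Nat.lt_mul_div_succ _ hc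
      have h4 : (t.toNat : Int) = t := Int.toNat_of_nonneg (by omega)
      have h5 : c * (t.toNat / c + 1) ≤ c * (t.toNat / c + 1 + j) := by
        apply Nat.mul_le_mul_left; omega
      have h8 : ((t.toNat : Int)) < (((c * (t.toNat / c + 1 + j) : Nat)) : Int) := by
        exact_mod_cast lt_of_lt_of_le h1 h5
      rw [Nat.cast_mul] at h8
      linarith
    rw [hz, add_zero, wZ, if_neg ht0]

-- one of A's loops, as a fold over pyRange, sums the inner counts
theorem fold_level (c : Nat) (hc : 0 < c) (M : Nat) (cs : List Nat) (t : Int) (ht : t ≤ M)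
    (G : Int → Int → Int)
    (hG : ∀ init x : Int, 0 ≤ x → G init x = init + wZ cs (t - c * x)) (init : Int) :
    (PySem.List.pyRange 0 (((M / c : Nat) : Int) + 1) 1).foldl G init
      = init + wZ (c :: cs) t := by
  rw [PySem.List.pyRange_one, List.foldl_map]
  have hb0 : (((M / c : Nat) : Int) + 1 - 0) = ((M / c + 1 : Nat) : Int) := by push_cast; ring
  rw [hb0, Int.toNat_natCast]
  rw [PySem.List.foldl_congr_mem
    (g := fun acc (k : Nat) => acc + wZ cs (t - (c : Int) * (k : Int)))]
  · rw [PySem.List.foldl_add]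
    rw [level cs c hc M t ht]
  · intro acc k hk
    rw [hG acc (0 + (k : Int)) (by omega)]
    norm_num

theorem A_eq (N : Nat) (h0 : (N : Int) ≠ 0) (h1 : (N : Int) ≠ 1) :
    football (N : Int) = wZ [8, 7, 6, 3, 2] (N : Int) := by
  have e8 : PySem.Int.floordiv (N : Int) 8 = ((N / 8 : Nat) : Int) := by
    exact_mod_cast PySem.Int.floordiv_natCast N 8
  have e7 : PySem.Int.floordiv (N : Int) 7 = ((N / 7 : Nat) : Int) := by
    exact_mod_cast PySem.Int.floordiv_natCast N 7
  have e6 : PySem.Int.floordiv (N : Int) 6 = ((N / 6 : Nat) : Int) := by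
    exact_mod_cast PySem.Int.floordiv_natCast N 6
  have e3 : PySem.Int.floordiv (N : Int) 3 = ((N / 3 : Nat) : Int) := by
    exact_mod_cast PySem.Int.floordiv_natCast N 3
  have e2 : PySem.Int.floordiv (N : Int) 2 = ((N / 2 : Nat) : Int) := by
    exact_mod_cast PySem.Int.floordiv_natCast N 2
  rw [football, if_neg h0, if_neg h1, e8, e7, e6, e3, e2]
  rw [fold_level 8 (by norm_num) N [7, 6, 3, 2] (N : Int) (by omega) _ ?_ 0, zero_add]
  intro i0 a ha
  rw [fold_level 7 (by norm_num) N [6, 3, 2] ((N : Int) - (8 : Nat) * a)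
    (by push_cast; nlinarith) _ ?_ i0]
  intro i1 b hb
  rw [fold_level 6 (by norm_num) N [3, 2] ((N : Int) - (8 : Nat) * a - (7 : Nat) * b)
    (by push_cast; nlinarith) _ ?_ i1]
  intro i2 c hc
  rw [fold_level 3 (by norm_num) N [2] ((N : Int) - (8 : Nat) * a - (7 : Nat) * b - (6 : Nat) * c)
    (by push_cast; nlinarith) _ ?_ i2]
  intro i3 d hd
  rw [fold_level 2 (by norm_num) N []
    ((N : Int) - (8 : Nat) * a - (7 : Nat) * b - (6 : Nat) * c - (3 : Nat) * d)
    (by push_cast; nlinarith) _ ?_ i3]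
  intro i4 e he
  simp only [wZ]
  split_ifs with hA hB hB <;> push_cast at * <;> first | rfl | omega

theorem dp_inner (c : Nat) (hc : 1 ≤ c) (cs : List Nat) (N : Nat) :
    ∀ (n : Nat) (i : Nat), i = N + 1 - n → c ≤ i → i ≤ N + 1 → ∀ dp : List Int,
      dp.length = N + 1 →
      (∀ x : Nat, x < i → x ≤ N → PySem.List.pyGetD dp (x : Int) 0 = wZ (c :: cs) (x : Int)) →
      (∀ x : Nat, i ≤ x → x ≤ N → PySem.List.pyGetD dp (x : Int) 0 = wZ cs (x : Int)) →
      (((PySem.List.pyRange (i : Int) ((N : Int) + 1) 1).foldl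
          (fun dp j => PySem.List.pySetD dp j
            (PySem.List.pyGetD dp j 0 + PySem.List.pyGetD dp (j - (c : Int)) 0)) dp).length = N + 1
        ∧ ∀ x : Nat, x ≤ N →
            PySem.List.pyGetD ((PySem.List.pyRange (i : Int) ((N : Int) + 1) 1).foldl
              (fun dp j => PySem.List.pySetD dp j
                (PySem.List.pyGetD dp j 0 + PySem.List.pyGetD dp (j - (c : Int)) 0)) dp)
              (x : Int) 0 = wZ (c :: cs) (x : Int)) := by
  intro n
  induction n with
  | zero =>
    intro i hi hci hiN dp hlen hlo hhi
    have hi' : i = N + 1 := by omega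
    subst hi'
    rw [PySem.List.pyRange_one_eq_nil (by push_cast; omega)]
    simp only [List.foldl_nil]
    exact ⟨hlen, fun x hx => hlo x (by omega) hx⟩
  | succ n ih =>
    intro i hi hci hiN dp hlen hlo hhi
    by_cases hend : i = N + 1
    · subst hend
      rw [PySem.List.pyRange_one_eq_nil (by push_cast; omega)]
      simp only [List.foldl_nil]
      exact ⟨hlen, fun x hx => hlo x (by omega) hx⟩
    · have hiN' : i ≤ N := by omega
      rw [PySem.List.pyRange_one_cons (by omega)]
      simp only [List.foldl_cons]
      have hvi : PySem.List.pyGetD dp (i : Int) 0 = wZ cs (i : Int) :=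
        hhi i (le_refl i) hiN'
      have hcast : ((i : Int) - (c : Int)) = (((i - c : Nat)) : Int) := by push_cast [hci]; ring
      have hvic : PySem.List.pyGetD dp ((i : Int) - (c : Int)) 0 = wZ (c :: cs) ((i - c : Nat) : Int) := by
        rw [hcast]; exact hlo (i - c) (by omega) (by omega)
      set v : Int := PySem.List.pyGetD dp (i : Int) 0 + PySem.List.pyGetD dp ((i : Int) - (c : Int)) 0 with hv
      have hvval : v = wZ (c :: cs) (i : Int) := by
        rw [hv, hvi, hvic, wZ_rec c cs (by omega) i hci]
      have hset : PySem.List.pySetD dp (i : Int) v = dp.set i v := by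
        exact_mod_cast PySem.List.pySetD_natCast dp i v
      have hlen1 : (PySem.List.pySetD dp (i : Int) v).length = N + 1 := by
        rw [hset, List.length_set, hlen]
      have hget1 : ∀ x : Nat, x ≤ N →
          PySem.List.pyGetD (PySem.List.pySetD dp (i : Int) v) (x : Int) 0
            = if x = i then v else PySem.List.pyGetD dp (x : Int) 0 := by
        intro x hx
        exact_mod_cast PySem.List.pyGetD_pySetD_natCast (n := i) (xs := dp) (v := v)
          (m := x) (d := 0) (by omega)
      have hres := ih (i + 1) (by omega) (by omega) (by omega)
        (PySem.List.pySetD dp (i : Int) v) hlen1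
        (by
          intro x hx hxN
          rw [hget1 x hxN]
          by_cases hxi : x = i
          · subst hxi; rw [if_pos rfl, hvval]
          · rw [if_neg hxi]
            exact hlo x (by omega) hxN)
        (by
          intro x hx hxN
          rw [hget1 x hxN, if_neg (by omega)]
          exact hhi x (by omega) hxN)
      have hpush : ((i : Int) + 1) = (((i + 1 : Nat)) : Int) := by push_cast; ring
      rw [hpush]
      exact hres

theorem dp_init (N : Nat) (x : Nat) (hx : x ≤ N) :
    PySem.List.pyGetD (1 :: List.replicate N (0 : Int)) (x : Int) 0 = wZ [] (x : Int) := by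
  rcases Nat.eq_zero_or_pos x with hx0 | hx0
  · subst hx0; simp [wZ]
  · have : ((x : Int)) ≠ 0 := by omega
    rw [wZ, if_neg this]
    rw [PySem.List.pyGetD_natCast]
    cases x with
    | zero => omega
    | succ y =>
      simp only [List.getD_cons_succ]
      rw [List.getD_eq_getElem?_getD]
      rcases Nat.lt_or_ge y N with h | h
      · simp [h]
      · simp [Nat.not_lt.mpr h]

theorem dp_coin (c : Nat) (hc : 1 ≤ c) (cs : List Nat) (N : Nat) (dp : List Int)
    (hlen : dp.length = N + 1)
    (hdp : ∀ x : Nat, x ≤ N → PySem.List.pyGetD dp (x : Int) 0 = wZ cs (x : Int)) :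
    (((PySem.List.pyRange (c : Int) ((N : Int) + 1) 1).foldl
        (fun dp j => PySem.List.pySetD dp j
          (PySem.List.pyGetD dp j 0 + PySem.List.pyGetD dp (j - (c : Int)) 0)) dp).length = N + 1
      ∧ ∀ x : Nat, x ≤ N →
          PySem.List.pyGetD ((PySem.List.pyRange (c : Int) ((N : Int) + 1) 1).foldl
            (fun dp j => PySem.List.pySetD dp j
              (PySem.List.pyGetD dp j 0 + PySem.List.pyGetD dp (j - (c : Int)) 0)) dp)
            (x : Int) 0 = wZ (c :: cs) (x : Int)) := by
  rcases Nat.lt_or_ge (N + 1) c with hcN | hcN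
  · rw [PySem.List.pyRange_one_eq_nil (by omega)]
    simp only [List.foldl_nil]
    exact ⟨hlen, fun x hxN => by
      rw [hdp x hxN, wZ_lt c cs _ (by omega) (by omega)]⟩
  · exact dp_inner c hc cs N (N + 1 - c) c (by omega) (le_refl c) hcN dp hlen
      (fun x hx hxN => by rw [hdp x hxN, wZ_lt c cs _ (by omega) (by omega)])
      (fun x hx hxN => hdp x hxN)

theorem B_eq (N : Nat) : football_alt (N : Int) = wZ [8, 7, 6, 3, 2] (N : Int) := by
  rw [football_alt, if_neg (by omega)]
  simp only [List.foldl_cons, List.foldl_nil, Int.toNat_natCast]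
  have h2 := dp_coin 2 (by norm_num) [] N (1 :: List.replicate N 0) (by simp) (dp_init N)
  simp only [Nat.cast_ofNat] at h2
  have h3 := dp_coin 3 (by norm_num) [2] N _ h2.1 h2.2
  simp only [Nat.cast_ofNat] at h3
  have h6 := dp_coin 6 (by norm_num) [3, 2] N _ h3.1 h3.2
  simp only [Nat.cast_ofNat] at h6
  have h7 := dp_coin 7 (by norm_num) [6, 3, 2] N _ h6.1 h6.2
  simp only [Nat.cast_ofNat] at h7
  have h8 := dp_coin 8 (by norm_num) [7, 6, 3, 2] N _ h7.1 h7.2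
  simp only [Nat.cast_ofNat] at h8
  exact h8.2 N (le_refl N)

theorem A_neg (score : Int) (h : score < 0) : football score = 0 := by
  have hd : PySem.Int.floordiv score 8 < 0 :=
    (PySem.Int.floordiv_lt_iff_lt_mul (by norm_num)).mpr (by omega)
  rw [football, if_neg (by omega), if_neg (by omega),
    PySem.List.pyRange_one_eq_nil (a := 0) (b := PySem.Int.floordiv score 8 + 1) (by omega)]
  simp

-- ===== VERDICT (by name: the statement is the Claim_ definition above) =====
theorem football_spec : Claim_equal_football := by
  intro score _
  unfold Spec_football
  rcases lt_trichotomy score 0 with h | h | h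
  · rw [A_neg score h]
    simp [football_alt, h]
  · subst h; decide
  · obtain ⟨N, rfl⟩ : ∃ N : Nat, score = (N : Int) := ⟨score.toNat, by omega⟩
    by_cases hN1 : (N : Int) = 1
    · rw [hN1]; decide
    · rw [A_eq N (by omega) hN1, B_eq N]
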